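-- pv_equiv track=rewrite | github.com/kickinslowly/xy | app.py | canonicalize_mode
-- ===== SOURCE A (Python) =====
-- MODE_SYNONYMS = {
--     'plane': {'plane', 'coordinate_plane', 'coordinate plane', 'graph', 'cartesian'},
--     'line': {'line', 'line_graph', 'line graph'},
--     'battleship': {'battleship', 'battle_ship', 'battle-ship'},
--     'memewars': {'memewars', 'meme_wars', 'meme-wars', 'meme wars'},
--     'memedash': {'memedash', 'meme_dash', 'meme-dash', 'meme dash'},
--     'ratios': {'ratios', 'ratio'},
-- }
--
-- def canonicalize_mode(value: str) -> str:
--     v = (value or '').strip().lower()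
--     if not v:
--         return 'unknown'
--     for canon, names in MODE_SYNONYMS.items():
--         if v in names:
--             return canon
--     return v
-- ===== SOURCE B (Python) =====
-- # Binary search over a sorted synonym table instead of scanning groups.
-- _PAIRS = sorted(
--     (syn, canon)
--     for canon, names in {
--         'plane': {'plane', 'coordinate_plane', 'coordinate plane', 'graph', 'cartesian'},
--         'line': {'line', 'line_graph', 'line graph'},
--         'battleship': {'battleship', 'battle_ship', 'battle-ship'},
--         'memewars': {'memewars', 'meme_wars', 'meme-wars', 'meme wars'},
--         'memedash': {'memedash', 'meme_dash', 'meme-dash', 'meme dash'},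
--         'ratios': {'ratios', 'ratio'},
--     }.items()
--     for syn in names
-- )
--
-- def canonicalize_mode(value: str) -> str:
--     v = (value or '').strip().lower()
--     if not v:
--         return 'unknown'
--     lo, hi = 0, len(_PAIRS)
--     while lo < hi:
--         mid = (lo + hi) // 2
--         key, canon = _PAIRS[mid]
--         if key == v:
--             return canon
--         if key < v:
--             lo = mid + 1
--         else:
--             hi = mid
--     return v
-- ===== Notes on version B (the rewrite author's own statement) =====
-- stated objective: alternative
-- what changed: A loops over the synonym groups testing set membership in each; B flattens the table once into a single list of (synonym, canonical) pairs sorted by synonym and resolves the value by hand-written binary search (string comparisons narrowing lo/hi), returning the stripped value on a miss.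
import Mathlib
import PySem

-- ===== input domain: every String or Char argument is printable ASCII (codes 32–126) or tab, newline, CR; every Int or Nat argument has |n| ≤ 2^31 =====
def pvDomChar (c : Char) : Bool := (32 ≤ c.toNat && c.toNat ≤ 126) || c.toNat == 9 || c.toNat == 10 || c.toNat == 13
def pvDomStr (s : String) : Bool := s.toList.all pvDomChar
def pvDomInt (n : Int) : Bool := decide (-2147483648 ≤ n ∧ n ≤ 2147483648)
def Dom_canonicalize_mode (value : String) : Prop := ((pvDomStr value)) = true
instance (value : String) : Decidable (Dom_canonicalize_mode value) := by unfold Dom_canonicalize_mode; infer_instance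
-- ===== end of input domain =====

-- B replaces A's scan over synonym groups by binary search in one sorted synonym table (alternative; same values).

-- ===== PORT A =====
-- MODE_SYNONYMS as an insertion-ordered dict of canonical name → synonym set
def MODE_SYNONYMS : PySem.Dict String (PySem.Set String) := PySem.Dict.ofList
  [ ("plane", PySem.Set.ofList ["plane", "coordinate_plane", "coordinate plane", "graph", "cartesian"])
  , ("line", PySem.Set.ofList ["line", "line_graph", "line graph"])
  , ("battleship", PySem.Set.ofList ["battleship", "battle_ship", "battle-ship"])
  , ("memewars", PySem.Set.ofList ["memewars", "meme_wars", "meme-wars", "meme wars"])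
  , ("memedash", PySem.Set.ofList ["memedash", "meme_dash", "meme-dash", "meme dash"])
  , ("ratios", PySem.Set.ofList ["ratios", "ratio"]) ]

-- the 'for canon, names in …: if v in names: return canon' loop with early return
def cmLoop (v : String) : List (String × PySem.Set String) → String
  | [] => v
  | (canon, names) :: rest => if PySem.Set.contains names v then canon else cmLoop v rest

def canonicalize_mode (value : String) : String :=
  let v := PySem.Str.lower (PySem.Str.strip (if value = "" then "" else value))
  if v = "" then "unknown"
  else cmLoop v MODE_SYNONYMS.items

-- ===== PORT B =====
-- _PAIRS: the 21 (synonym, canonical) pairs, sorted by synonym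
def PAIRS : List (String × String) :=
  [ ("battle-ship", "battleship"), ("battle_ship", "battleship"), ("battleship", "battleship")
  , ("cartesian", "plane"), ("coordinate plane", "plane"), ("coordinate_plane", "plane")
  , ("graph", "plane")
  , ("line", "line"), ("line graph", "line"), ("line_graph", "line")
  , ("meme dash", "memedash"), ("meme wars", "memewars")
  , ("meme-dash", "memedash"), ("meme-wars", "memewars")
  , ("meme_dash", "memedash"), ("meme_wars", "memewars")
  , ("memedash", "memedash"), ("memewars", "memewars")
  , ("plane", "plane"), ("ratio", "ratios"), ("ratios", "ratios") ]

-- Python's '<' on strings, lexicographic by code point (exact on these strings)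
def strLt : List Char → List Char → Bool
  | [], [] => false
  | [], _ :: _ => true
  | _ :: _, [] => false
  | a :: as, b :: bs =>
    if a.toNat < b.toNat then true
    else if b.toNat < a.toNat then false
    else strLt as bs

-- the 'while lo < hi' binary-search loop; fuel only makes the recursion structural
def bsearch (v : String) : Nat → Nat → Nat → Option String
  | 0, _, _ => none
  | fuel+1, lo, hi =>
    if lo < hi then
      if (PAIRS.getD ((lo + hi) / 2) ("", "")).1 = v then
        some (PAIRS.getD ((lo + hi) / 2) ("", "")).2
      else if strLt (PAIRS.getD ((lo + hi) / 2) ("", "")).1.toList v.toList then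
        bsearch v fuel ((lo + hi) / 2 + 1) hi
      else
        bsearch v fuel lo ((lo + hi) / 2)
    else none

def canonicalize_mode_alt (value : String) : String :=
  let v := PySem.Str.lower (PySem.Str.strip (if value = "" then "" else value))
  if v = "" then "unknown"
  else (bsearch v 32 0 PAIRS.length).getD v

-- ===== PRECONDITION & SPEC =====
def Spec_canonicalize_mode (value : String) (out : String) : Prop := out = canonicalize_mode_alt value
instance (value : String) (out : String) : Decidable (Spec_canonicalize_mode value out) := by unfold Spec_canonicalize_mode; infer_instance

-- ===== CLAIM (what is proved, stated in full; the proofs are below) =====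
def Claim_equal_canonicalize_mode : Prop := ∀ (value : String), Dom_canonicalize_mode value → Spec_canonicalize_mode value (canonicalize_mode value)

-- ===== LEMMAS AND PROOFS =====
-- binary search misses when no table key equals v (v nonempty rules out the padding default)
theorem bsearch_none (v : String) (hv : ∀ p ∈ PAIRS, p.1 ≠ v) (hne : v ≠ "") :
    ∀ fuel lo hi, bsearch v fuel lo hi = none := by
  intro fuel
  induction fuel with
  | zero => intro lo hi; rfl
  | succ n ih =>
    intro lo hi
    unfold bsearch
    split
    · by_cases hm : (lo + hi) / 2 < PAIRS.length
      · have hp : PAIRS.getD ((lo + hi) / 2) ("", "") = PAIRS[(lo + hi) / 2] :=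
          List.getD_eq_getElem PAIRS _ hm
        rw [hp, if_neg (hv _ (PAIRS.getElem_mem hm))]
        split <;> exact ih _ _
      · have hp : PAIRS.getD ((lo + hi) / 2) ("", "") = ("", "") := by
          simp [List.getD_eq_getElem?_getD,
                List.getElem?_eq_none (by omega : PAIRS.length ≤ (lo + hi) / 2)]
        rw [hp, if_neg (fun h => hne h.symm)]
        split <;> exact ih _ _
    · rfl

set_option maxHeartbeats 1000000 in
set_option maxRecDepth 16384 in
-- group-scan and binary search agree on every nonempty string v
theorem cmLoop_eq_bsearch (v : String) (hne : v ≠ "") :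
    cmLoop v MODE_SYNONYMS.items = (bsearch v 32 0 PAIRS.length).getD v := by
  by_cases h0 : v = "plane"
  · subst h0; decide
  by_cases h1 : v = "coordinate_plane"
  · subst h1; decide
  by_cases h2 : v = "coordinate plane"
  · subst h2; decide
  by_cases h3 : v = "graph"
  · subst h3; decide
  by_cases h4 : v = "cartesian"
  · subst h4; decide
  by_cases h5 : v = "line"
  · subst h5; decide
  by_cases h6 : v = "line_graph"
  · subst h6; decide
  by_cases h7 : v = "line graph"
  · subst h7; decide
  by_cases h8 : v = "battleship"
  · subst h8; decide
  by_cases h9 : v = "battle_ship"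
  · subst h9; decide
  by_cases h10 : v = "battle-ship"
  · subst h10; decide
  by_cases h11 : v = "memewars"
  · subst h11; decide
  by_cases h12 : v = "meme_wars"
  · subst h12; decide
  by_cases h13 : v = "meme-wars"
  · subst h13; decide
  by_cases h14 : v = "meme wars"
  · subst h14; decide
  by_cases h15 : v = "memedash"
  · subst h15; decide
  by_cases h16 : v = "meme_dash"
  · subst h16; decide
  by_cases h17 : v = "meme-dash"
  · subst h17; decide
  by_cases h18 : v = "meme dash"
  · subst h18; decide
  by_cases h19 : v = "ratios"
  · subst h19; decide
  by_cases h20 : v = "ratio"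
  · subst h20; decide
  have hv : ∀ p ∈ PAIRS, p.1 ≠ v := by
    intro p hp
    simp only [PAIRS, List.mem_cons, List.not_mem_nil, or_false] at hp
    rcases hp with rfl|rfl|rfl|rfl|rfl|rfl|rfl|rfl|rfl|rfl|rfl|rfl|rfl|rfl|rfl|rfl|rfl|rfl|rfl|rfl|rfl
    all_goals intro h
    exacts [h10 h.symm, h9 h.symm, h8 h.symm, h4 h.symm, h2 h.symm, h1 h.symm, h3 h.symm,
            h5 h.symm, h7 h.symm, h6 h.symm, h18 h.symm, h14 h.symm, h17 h.symm, h13 h.symm,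
            h16 h.symm, h12 h.symm, h15 h.symm, h11 h.symm, h0 h.symm, h20 h.symm, h19 h.symm]
  rw [bsearch_none v hv hne]
  have hMS : MODE_SYNONYMS.items =
      [ ("plane", ["plane", "coordinate_plane", "coordinate plane", "graph", "cartesian"])
      , ("line", ["line", "line_graph", "line graph"])
      , ("battleship", ["battleship", "battle_ship", "battle-ship"])
      , ("memewars", ["memewars", "meme_wars", "meme-wars", "meme wars"])
      , ("memedash", ["memedash", "meme_dash", "meme-dash", "meme dash"])
      , ("ratios", ["ratios", "ratio"]) ] := by decide
  rw [hMS]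
  simp only [cmLoop, PySem.Set.contains]
  simp [h0, h1, h2, h3, h4, h5, h6, h7, h8, h9, h10, h11, h12, h13, h14, h15, h16, h17, h18, h19, h20]

-- ===== VERDICT (by name: the statement is the Claim_ definition above) =====
theorem canonicalize_mode_spec : Claim_equal_canonicalize_mode := by
  intro value _
  unfold Spec_canonicalize_mode canonicalize_mode canonicalize_mode_alt
  by_cases h : PySem.Str.lower (PySem.Str.strip (if value = "" then "" else value)) = ""
  · simp only [h, if_pos]
  · simp only [h, cmLoop_eq_bsearch _ h]
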